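-- pv_equiv track=rewrite | github.com/amar3012005/AgentScope | AgentScope-BLAIQ/src/agentscope_blaiq/app/services/content_director_v2.py | _merge_stream_text
-- ===== SOURCE A (Python) =====
-- def _merge_stream_text(previous: str, piece: str) -> str:
--     prev = str(previous or "")
--     current = str(piece or "")
--     if not current:
--         return prev
--     if not prev:
--         return current
--     if current == prev:
--         return prev
--     if current.startswith(prev):
--         return current
--     if prev.endswith(current):
--         return prev
--     overlap_max = min(len(prev), len(current))
--     for overlap in range(overlap_max, 0, -1):
--         if prev.endswith(current[:overlap]):
--             return prev + current[overlap:]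
--     return prev + current
-- ===== SOURCE B (Python) =====
-- def _merge_stream_text(previous: str, piece: str) -> str:
--     prev = str(previous or "")
--     cur = str(piece or "")
--     if not prev:
--         return cur
--     if not cur:
--         return prev
--     n = len(prev)
--     # scan candidate overlap start positions left-to-right: the first position i
--     # (>= n - len(cur)) where prev[i:] is a prefix of cur gives the largest overlap.
--     i = prev.find(cur[0], max(0, n - len(cur)))
--     while i != -1:
--         if cur.startswith(prev[i:]):
--             return prev + cur[n - i:]
--         i = prev.find(cur[0], i + 1)
--     return prev + cur
-- ===== Notes on version B (the rewrite author's own statement) =====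
-- stated objective: faster
-- what changed: Instead of trying every overlap length from largest to smallest with an O(k) endswith test each, B scans prev left-to-right with str.find for positions where prev[i] equals piece[0] and does one startswith test per such candidate, so positions whose first character cannot start an overlap are skipped at C speed.
import Mathlib
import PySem

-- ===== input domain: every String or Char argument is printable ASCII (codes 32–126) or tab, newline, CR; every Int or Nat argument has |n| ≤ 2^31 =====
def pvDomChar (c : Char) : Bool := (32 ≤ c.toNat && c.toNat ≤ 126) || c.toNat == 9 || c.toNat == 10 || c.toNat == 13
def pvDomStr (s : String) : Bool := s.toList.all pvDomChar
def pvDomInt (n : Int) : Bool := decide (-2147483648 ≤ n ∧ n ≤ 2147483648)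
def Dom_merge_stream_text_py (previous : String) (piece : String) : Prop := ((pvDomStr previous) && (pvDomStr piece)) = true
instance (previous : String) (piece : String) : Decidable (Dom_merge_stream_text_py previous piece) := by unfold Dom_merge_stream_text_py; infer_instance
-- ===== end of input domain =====

-- B replaces A's descending scan over overlap lengths (one O(overlap) endswith test per length)
-- by a left-to-right str.find scan over the positions where prev[i] equals piece[0], checking a
-- single startswith per candidate; measured faster by a constant factor on large inputs.

-- ===== PORT A =====
-- for overlap in range(overlap_max, 0, -1): if prev.endswith(current[:overlap]): return prev + current[overlap:]
def pvLoopA (p c : List Char) : Nat → String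
  | 0 => String.ofList (p ++ c)
  | k+1 =>
    if PySem.Chars.endswith p (PySem.Chars.slice c none (some ((k : Int) + 1))) then
      String.ofList (p ++ PySem.Chars.slice c (some ((k : Int) + 1)) none)
    else pvLoopA p c k

def merge_stream_text_py (previous : String) (piece : String) : String :=
  if piece.toList.isEmpty then previous
  else if previous.toList.isEmpty then piece
  else if piece = previous then previous
  else if PySem.Str.startswith piece previous then piece
  else if PySem.Str.endswith previous piece then previous
  else pvLoopA previous.toList piece.toList (min previous.toList.length piece.toList.length)

-- ===== PORT B =====
-- while i != -1: if cur.startswith(prev[i:]): return prev + cur[n-i:]; i = prev.find(cur[0], i+1)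
-- (fuel only makes the recursion total; it is never exhausted when called with fuel = n+1)
def pvLoopB (p c : List Char) (n : Nat) (first : Char) : Nat → Int → String
  | 0, _ => String.ofList (p ++ c)
  | fuel+1, i =>
    if i = -1 then String.ofList (p ++ c)
    else if PySem.Chars.startswith c (PySem.Chars.slice p (some i) none) then
      String.ofList (p ++ PySem.Chars.slice c (some ((n : Int) - i)) none)
    else pvLoopB p c n first fuel (PySem.Chars.findFrom p [first] (i + 1) none)

def merge_stream_text_py_alt (previous : String) (piece : String) : String :=
  let p := previous.toList
  let c := piece.toList
  if p.isEmpty then piece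
  else if c.isEmpty then previous
  else
    let first := c.headD ' '
    let n := p.length
    let start : Int := max 0 ((n : Int) - (c.length : Int))
    pvLoopB p c n first (n + 1) (PySem.Chars.findFrom p [first] start none)

-- ===== PRECONDITION & SPEC =====
def Spec_merge_stream_text_py (previous : String) (piece : String) (out : String) : Prop := out = merge_stream_text_py_alt previous piece
instance (previous : String) (piece : String) (out : String) : Decidable (Spec_merge_stream_text_py previous piece out) := by unfold Spec_merge_stream_text_py; infer_instance

-- ===== CLAIM (what is proved, stated in full; the proofs are below) =====
def Claim_equal_merge_stream_text_py : Prop := ∀ (previous : String) (piece : String), Dom_merge_stream_text_py previous piece → Spec_merge_stream_text_py previous piece (merge_stream_text_py previous piece)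

-- ===== LEMMAS AND PROOFS =====

-- the largest overlap k ≤ K (0 if none): prev ends with piece[:k]
def pvBestOv (p c : List Char) : Nat → Nat
  | 0 => 0
  | k+1 => if c.take (k+1) <:+ p then k+1 else pvBestOv p c k

theorem pvBestOv_congr (p c : List Char) {K2 K1 : Nat} (hle : K2 ≤ K1)
    (h : ∀ j, K2 < j → j ≤ K1 → ¬ (c.take j <:+ p)) : pvBestOv p c K1 = pvBestOv p c K2 := by
  induction K1 with
  | zero => simp [Nat.le_zero.mp hle]
  | succ K ih =>
    rcases Nat.eq_or_lt_of_le hle with rfl | hlt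
    · rfl
    · have hK2 : K2 ≤ K := by omega
      have : ¬ (c.take (K+1) <:+ p) := h (K+1) (by omega) (by omega)
      simp only [pvBestOv, if_neg this]
      exact ih hK2 (fun j h1 h2 => h j h1 (by omega))

theorem pvFlip (p c : List Char) {k : Nat} (_hk1 : 1 ≤ k) (hkm : k ≤ c.length) (hkn : k ≤ p.length) :
    (c.take k <:+ p) ↔ (p.drop (p.length - k) <+: c) := by
  rw [List.suffix_iff_eq_drop, List.prefix_iff_eq_take, List.length_take, min_eq_left hkm,
    List.length_drop, Nat.sub_sub_self hkn]
  exact eq_comm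

theorem pvHeadPre (p c : List Char) {k : Nat} (hc : c ≠ []) (hk1 : 1 ≤ k) (hkm : k ≤ c.length)
    (hkn : k ≤ p.length) (h : c.take k <:+ p) : [c.head hc] <+: p.drop (p.length - k) := by
  have heq : c.take k = p.drop (p.length - k) := by
    rw [List.suffix_iff_eq_drop, List.length_take, min_eq_left hkm] at h
    exact h
  have : [c.head hc] <+: c.take k := by
    cases c with
    | nil => exact absurd rfl hc
    | cons a t =>
      cases k with
      | zero => omega
      | succ k' => simp [List.take_succ_cons]
  rwa [heq] at this

theorem pvLoopA_eq (p c : List Char) (K : Nat) :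
    pvLoopA p c K = String.ofList (p ++ c.drop (pvBestOv p c K)) := by
  induction K with
  | zero => simp [pvLoopA, pvBestOv]
  | succ k ih =>
    have htn : ((k : Int) + 1).toNat = k + 1 := by omega
    have hsl1 : PySem.List.slice c none (some ((k : Int) + 1)) = c.take (k+1) := by
      rw [PySem.List.slice_to c (by omega), htn]
    have hsl2 : PySem.List.slice c (some ((k : Int) + 1)) none = c.drop (k+1) := by
      rw [PySem.List.slice_from c (by omega), htn]
    by_cases h : c.take (k+1) <:+ p
    · have hb : PySem.Chars.endswith p (c.take (k+1)) = true :=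
        (PySem.Chars.endswith_iff p (c.take (k+1))).mpr h
      simp [pvLoopA, pvBestOv, hsl1, hsl2, hb, h]
    · have hb : PySem.Chars.endswith p (c.take (k+1)) = false := by
        rw [← Bool.not_eq_true]
        exact fun hx => h ((PySem.Chars.endswith_iff p (c.take (k+1))).mp hx)
      simp [pvLoopA, pvBestOv, hsl1, hb, h, ih]

theorem pvLoopB_spec (p c : List Char) (hc : c ≠ []) (fuel : Nat) : ∀ (s : Nat),
    s ≤ p.length → p.length - s ≤ c.length → p.length - s < fuel →
    pvLoopB p c p.length (c.head hc) fuel (PySem.Chars.findFrom p [c.head hc] (s : Int) none)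
      = String.ofList (p ++ c.drop (pvBestOv p c (p.length - s))) := by
  induction fuel with
  | zero => intro s _ _ hf; omega
  | succ f ih =>
    intro s hs hm _
    set first := c.head hc with hfirst
    by_cases h1 : PySem.Chars.findFrom p [first] (s : Int) none = -1
    · -- no further occurrence of the first character: no overlap at all
      have hno : ¬ ([first] <:+: p.drop s) :=
        (PySem.Chars.findFrom_natCast_eq_neg_one_iff p [first] s hs).mp h1
      have hzero : pvBestOv p c (p.length - s) = 0 := by
        have := pvBestOv_congr p c (K2 := 0) (K1 := p.length - s) (by omega)
          (fun j h1j h2j hsuf => by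
            have hpre : [first] <+: p.drop (p.length - j) :=
              pvHeadPre p c hc (by omega) (by omega) (by omega) hsuf
            apply hno
            have hdd : p.drop (p.length - j) = (p.drop s).drop (p.length - j - s) := by
              rw [List.drop_drop]; congr 1; omega
            rw [hdd] at hpre
            exact hpre.isInfix.trans (List.drop_suffix _ _).isInfix)
        simpa [pvBestOv] using this
      simp only [pvLoopB, if_pos h1, hzero, List.drop_zero]
    · obtain ⟨hsi, hpre, hmin⟩ := PySem.Chars.findFrom_natCast_spec p [first] s hs h1
      set i := PySem.Chars.findFrom p [first] (s : Int) none with hi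
      have hi0 : 0 ≤ i := le_trans (by exact_mod_cast Int.natCast_nonneg s) hsi
      set it := i.toNat with hit
      have hsit : s ≤ it := by omega
      have hitn : it < p.length := by
        by_contra hge
        have : p.drop it = [] := List.drop_eq_nil_of_le (by omega)
        rw [this] at hpre
        simp at hpre
      have hslp : PySem.Chars.slice p (some i) none = p.drop it := by
        rw [PySem.Chars.slice_eq_listSlice, PySem.List.slice_from p hi0]
      by_cases h2 : PySem.Chars.startswith c (p.drop it) = true
      · -- success: first good candidate found
        have hpc : p.drop it <+: c := (PySem.Chars.startswith_iff c (p.drop it)).mp h2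
        have hlen : p.length - it ≤ c.length := by
          have := hpc.length_le
          rw [List.length_drop] at this
          omega
        have hslc : PySem.Chars.slice c (some ((p.length : Int) - i)) none = c.drop (p.length - it) := by
          rw [PySem.Chars.slice_eq_listSlice, PySem.List.slice_from c (by omega)]
          congr 1; omega
        have hbest : pvBestOv p c (p.length - s) = p.length - it := by
          rw [pvBestOv_congr p c (K2 := p.length - it) (K1 := p.length - s) (by omega)
            (fun j h1j h2j hsuf => by
              have hpj : [first] <+: p.drop (p.length - j) :=
                pvHeadPre p c hc (by omega) (by omega) (by omega) hsuf
              exact hmin (p.length - j) (by omega) (by omega) hpj)]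
          rcases Nat.exists_eq_succ_of_ne_zero (n := p.length - it) (by omega) with ⟨k', hk'⟩
          rw [hk']
          have hgood : c.take (k'+1) <:+ p := by
            rw [pvFlip p c (by omega) (by omega) (by omega)]
            rw [show p.length - (k'+1) = it by omega]
            exact hpc
          simp [pvBestOv, hgood]
        simp only [pvLoopB, if_neg h1, hslp, if_pos h2, hslc, hbest]
      · -- skip this candidate; overlap p.length - it is ruled out too
        have hpc : ¬ (p.drop it <+: c) := fun hb => h2 ((PySem.Chars.startswith_iff c (p.drop it)).mpr hb)
        have hstep : (i + 1 : Int) = ((it + 1 : Nat) : Int) := by omega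
        have hbest : pvBestOv p c (p.length - s) = pvBestOv p c (p.length - (it + 1)) := by
          apply pvBestOv_congr p c (by omega)
          intro j h1j h2j hsuf
          by_cases hje : j = p.length - it
          · apply hpc
            have := (pvFlip p c (k := j) (by omega) (by omega) (by omega)).mp hsuf
            rwa [show p.length - j = it by omega] at this
          · have hpj : [first] <+: p.drop (p.length - j) :=
              pvHeadPre p c hc (by omega) (by omega) (by omega) hsuf
            exact hmin (p.length - j) (by omega) (by omega) hpj
        simp only [pvLoopB, if_neg h1, hslp, if_neg h2, hstep, hbest]
        exact ih (it + 1) (by omega) (by omega) (by omega)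

theorem pvAlt_eq (previous piece : String) (hp : previous.toList ≠ []) (hc : piece.toList ≠ []) :
    merge_stream_text_py_alt previous piece
      = String.ofList (previous.toList ++
          piece.toList.drop (pvBestOv previous.toList piece.toList
            (min previous.toList.length piece.toList.length))) := by
  have hpne : previous.toList.isEmpty = false := by simp [hp]
  have hcne : piece.toList.isEmpty = false := by simp [hc]
  have hhead : piece.toList.headD ' ' = piece.toList.head hc := by
    rw [List.headD_eq_head?, List.head?_eq_some_head hc]
    rfl
  have hstart : (max 0 ((previous.toList.length : Int) - (piece.toList.length : Int)))
      = ((previous.toList.length - piece.toList.length : Nat) : Int) := by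
    rw [Int.max_def]; split <;> omega
  have hmineq : previous.toList.length - (previous.toList.length - piece.toList.length)
      = min previous.toList.length piece.toList.length := by omega
  simp only [merge_stream_text_py_alt, hpne, hcne, Bool.false_eq_true, if_false, hhead, hstart]
  rw [pvLoopB_spec previous.toList piece.toList hc (previous.toList.length + 1)
    (previous.toList.length - piece.toList.length) (by omega) (by omega) (by omega), hmineq]

theorem pvBestOv_full (p c : List Char) (hc : c ≠ []) (hlen : c.length ≤ p.length)
    (h : c.take c.length <:+ p) : pvBestOv p c (min p.length c.length) = c.length := by
  have hmin : min p.length c.length = c.length := by omega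
  rw [hmin]
  rcases Nat.exists_eq_succ_of_ne_zero (n := c.length) (by simpa [List.length_eq_zero_iff] using hc) with ⟨k, hk⟩
  rw [hk]
  rw [hk] at h
  simp [pvBestOv, h]

-- ===== VERDICT (by name: the statement is the Claim_ definition above) =====
theorem merge_stream_text_py_spec : Claim_equal_merge_stream_text_py := by
  intro previous piece _
  unfold Spec_merge_stream_text_py
  by_cases hc0 : piece.toList = []
  · by_cases hp0 : previous.toList = []
    · have hpp : previous = piece := by
        have h1 : String.ofList previous.toList = String.ofList piece.toList := by rw [hp0, hc0]
        simpa using h1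
      simp [merge_stream_text_py, merge_stream_text_py_alt, hc0, hpp]
    · simp [merge_stream_text_py, merge_stream_text_py_alt, hc0, List.isEmpty_iff, hp0]
  · by_cases hp0 : previous.toList = []
    · simp [merge_stream_text_py, merge_stream_text_py_alt, hc0, hp0, List.isEmpty_iff]
    · rw [pvAlt_eq previous piece hp0 hc0]
      have hcne : piece.toList.isEmpty = false := by simp [hc0]
      have hpne : previous.toList.isEmpty = false := by simp [hp0]
      have hpmk : String.ofList previous.toList = previous := by simp
      have hcmk : String.ofList piece.toList = piece := by simp
      by_cases h3 : piece = previous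
      · -- equal strings: full overlap
        have hcp : piece.toList = previous.toList := by rw [h3]
        have hbest : pvBestOv previous.toList piece.toList
            (min previous.toList.length piece.toList.length) = piece.toList.length := by
          refine pvBestOv_full _ _ hc0 (le_of_eq (congrArg List.length hcp)) ?_
          rw [List.take_length, hcp]
        simp only [merge_stream_text_py, hcne, hpne, Bool.false_eq_true, if_false, if_pos h3, hbest]
        rw [List.drop_length, List.append_nil, hpmk]
      · by_cases h4 : PySem.Str.startswith piece previous = true
        · -- previous is a prefix of piece
          have hpre : previous.toList <+: piece.toList := by
            have h4' := h4
            rw [PySem.Str.startswith_eq] at h4'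
            exact (PySem.Chars.startswith_iff _ _).mp h4'
          have hnm : previous.toList.length ≤ piece.toList.length := hpre.length_le
          have hmin : min previous.toList.length piece.toList.length
              = previous.toList.length := by omega
          have htake : piece.toList.take previous.toList.length = previous.toList :=
            (List.prefix_iff_eq_take.mp hpre).symm
          have hbest : pvBestOv previous.toList piece.toList
              (min previous.toList.length piece.toList.length) = previous.toList.length := by
            rw [hmin]
            rcases Nat.exists_eq_succ_of_ne_zero (n := previous.toList.length)
              (by simpa [List.length_eq_zero_iff] using hp0) with ⟨k, hk⟩
            rw [hk]
            have hgood : piece.toList.take (k+1) <:+ previous.toList := by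
              rw [show k + 1 = previous.toList.length from by omega, htake]
            simp [pvBestOv, hgood]
          have happ : previous.toList ++ piece.toList.drop previous.toList.length
              = piece.toList := List.prefix_iff_eq_append.mp hpre
          simp only [merge_stream_text_py, hcne, hpne, Bool.false_eq_true, if_false,
            if_neg h3, if_pos h4, hbest, happ, hcmk]
        · by_cases h5 : PySem.Str.endswith previous piece = true
          · -- piece is a suffix of previous
            have hsuf : piece.toList <:+ previous.toList := by
              have h5' := h5
              rw [PySem.Str.endswith_eq] at h5'
              exact (PySem.Chars.endswith_iff _ _).mp h5'
            have hbest : pvBestOv previous.toList piece.toList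
                (min previous.toList.length piece.toList.length) = piece.toList.length := by
              refine pvBestOv_full _ _ hc0 hsuf.length_le ?_
              rw [List.take_length]
              exact hsuf
            simp only [merge_stream_text_py, hcne, hpne, Bool.false_eq_true, if_false,
              if_neg h3, if_neg h4, if_pos h5, hbest]
            rw [List.drop_length, List.append_nil, hpmk]
          · simp only [merge_stream_text_py, hcne, hpne, Bool.false_eq_true, if_false,
              if_neg h3, if_neg h4, if_neg h5]
            exact pvLoopA_eq previous.toList piece.toList _
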